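-- pv_equiv track=rewrite | github.com/mzoyo/sorteo-comidas | main_terminal.py | target_sizes
-- ===== SOURCE A (Python) =====
-- def target_sizes(n_people, groups):
--     """
--     Objetivos de tamaño por grupo priorizando que las CENAS queden
--     con el tamaño más pequeño cuando no se pueda empatar todo.
--
--     Estrategia:
--       - base = n // k para todos
--       - reparte los 'rem' incrementos (+1) primero entre COMIDAS
--         y solo si sobran, en CENAS.
--     """
--     k = len(groups)
--     base = n_people // k
--     rem = n_people % k
--
--     targets = [base] * k
--     dinner_idx = [i for i, g in enumerate(groups) if g.lower().startswith("cena")]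
--     lunch_idx  = [i for i in range(k) if i not in dinner_idx]
--
--     i = 0
--     while rem > 0 and i < len(lunch_idx):
--         targets[lunch_idx[i]] += 1
--         rem -= 1
--         i += 1
--     i = 0
--     while rem > 0 and i < len(dinner_idx):
--         targets[dinner_idx[i]] += 1
--         rem -= 1
--         i += 1
--
--     return targets
-- ===== SOURCE B (Python) =====
-- def target_sizes(n_people, groups):
--     k = len(groups)
--     base, rem = divmod(n_people, k)
--     is_dinner = [g.lower().startswith("cena") for g in groups]
--     lunch_bonus = min(rem, is_dinner.count(False))
--     dinner_bonus = rem - lunch_bonus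
--     out, seen_l, seen_d = [], 0, 0
--     for d in is_dinner:
--         if d:
--             out.append(base + (seen_d < dinner_bonus))
--             seen_d += 1
--         else:
--             out.append(base + (seen_l < lunch_bonus))
--             seen_l += 1
--     return out
-- ===== Notes on version B (the rewrite author's own statement) =====
-- stated objective: alternative
-- what changed: A materialises dinner/lunch index lists (with a quadratic 'i not in dinner_idx' scan) and mutates a targets array in two while-loops; B computes the lunch/dinner bonus counts up front and emits the result in one pass over the dinner flags with two running counters.
import Mathlib
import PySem

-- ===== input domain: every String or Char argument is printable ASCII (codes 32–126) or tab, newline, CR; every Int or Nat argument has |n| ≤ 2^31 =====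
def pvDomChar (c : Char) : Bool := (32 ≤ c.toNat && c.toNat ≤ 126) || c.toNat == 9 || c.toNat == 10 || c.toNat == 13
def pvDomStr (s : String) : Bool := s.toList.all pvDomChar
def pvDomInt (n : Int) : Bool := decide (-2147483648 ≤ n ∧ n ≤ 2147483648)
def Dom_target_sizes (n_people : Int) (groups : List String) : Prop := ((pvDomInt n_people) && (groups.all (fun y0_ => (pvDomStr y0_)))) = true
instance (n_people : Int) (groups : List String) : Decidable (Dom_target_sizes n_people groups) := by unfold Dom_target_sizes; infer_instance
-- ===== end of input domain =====

-- B replaces A's quadratic index-list bookkeeping ('i not in dinner_idx' + two in-place increment loops)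
-- by a single pass over the dinner flags with two counters (objective: alternative decomposition).

-- ===== PORT A =====
-- 'g.lower().startswith("cena")' — shared helper (both Pythons compute the dinner test identically)
def pvIsDinner (g : String) : Bool := PySem.Str.startswith (PySem.Str.lower g) "cena"

-- A's 'while rem > 0 and i < len(idx): targets[idx[i]] += 1; rem -= 1; i += 1'
def pvBump : List Int → List Int → Int → (List Int × Int)
  | t, [], rem => (t, rem)
  | t, j :: js, rem =>
    if rem > 0 then
      pvBump (PySem.List.pySetD t j (PySem.List.pyGetD t j 0 + 1)) js (rem - 1)
    else (t, rem)

def target_sizes (n_people : Int) (groups : List String) : List Int :=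
  let k : Int := (groups.length : Int)
  let base := PySem.Int.floordiv n_people k
  let rem := PySem.Int.mod n_people k
  let targets := List.replicate groups.length base
  let dinner_idx := ((PySem.List.enumerate groups 0).filter (fun p => pvIsDinner p.2)).map (·.1)
  let lunch_idx := (PySem.List.pyRange 0 k 1).filter (fun i => !(dinner_idx.contains i))
  let r1 := pvBump targets lunch_idx rem
  (pvBump r1.1 dinner_idx r1.2).1

-- ===== PORT B =====
-- B's 'for d in is_dinner: out.append(base + (seen < bonus)); seen += 1'
def pvBLoop : List Bool → Int → Int → Int → Int → Int → List Int
  | [], _, _, _, _, _ => []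
  | d :: ds, base, lb, db, sl, sd =>
    if d then (base + if sd < db then 1 else 0) :: pvBLoop ds base lb db sl (sd + 1)
    else (base + if sl < lb then 1 else 0) :: pvBLoop ds base lb db (sl + 1) sd

def target_sizes_alt (n_people : Int) (groups : List String) : List Int :=
  let k : Int := (groups.length : Int)
  let base := PySem.Int.floordiv n_people k
  let rem := PySem.Int.mod n_people k
  let is_dinner := groups.map pvIsDinner
  let lunch_bonus := min rem ((PySem.List.count is_dinner false : Nat) : Int)
  let dinner_bonus := rem - lunch_bonus
  pvBLoop is_dinner base lunch_bonus dinner_bonus 0 0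

-- ===== PRECONDITION & SPEC =====
-- A raises ZeroDivisionError on groups = [] (k = 0); B divides by zero there too, so it is excluded.
def Pre_target_sizes (n_people : Int) (groups : List String) : Prop := groups ≠ []
instance (n_people : Int) (groups : List String) : Decidable (Pre_target_sizes n_people groups) := by unfold Pre_target_sizes; infer_instance
def pvWitness_target_sizes : Int × List String := (5, ["Cena A", "comida", "x"])

def Spec_target_sizes (n_people : Int) (groups : List String) (out : List Int) : Prop := out = target_sizes_alt n_people groups
instance (n_people : Int) (groups : List String) (out : List Int) : Decidable (Spec_target_sizes n_people groups out) := by unfold Spec_target_sizes; infer_instance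

-- ===== CLAIM (what is proved, stated in full; the proofs are below) =====
def Claim_equal_target_sizes : Prop := ∀ (n_people : Int) (groups : List String), Dom_target_sizes n_people groups → Pre_target_sizes n_people groups → Spec_target_sizes n_people groups (target_sizes n_people groups)

-- ===== LEMMAS AND PROOFS =====

-- pvBump preserves the length of the target list
theorem pvBump_len (js : List Int) (t : List Int) (rem : Int) :
    (pvBump t js rem).1.length = t.length := by
  induction js generalizing t rem with
  | nil => rfl
  | cons j js ih =>
    simp only [pvBump]
    split
    · rw [ih]; simp
    · rfl

-- pvBump's leftover remainder
theorem pvBump_snd (js : List Int) (t : List Int) (rem : Int) (h : 0 ≤ rem) :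
    (pvBump t js rem).2 = rem - min rem (js.length : Int) := by
  induction js generalizing t rem with
  | nil => simp [pvBump]; omega
  | cons j js ih =>
    simp only [pvBump]
    split
    · rw [ih _ _ (by omega)]; simp; omega
    · simp; omega

-- pvBump over distinct in-range Nat indices: +1 exactly on the first rem.toNat of them
theorem pvBump_get? (NS : List ℕ) (t : List Int) (rem : Int)
    (hnd : NS.Nodup) (hlt : ∀ j ∈ NS, j < t.length)
    (p : ℕ) (hp : p < t.length) :
    (pvBump t (NS.map Int.ofNat) rem).1[p]?
      = some (t[p] + (if p ∈ NS.take rem.toNat then 1 else 0)) := by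
  induction NS generalizing t rem with
  | nil => simp [pvBump, List.getElem?_eq_getElem hp]
  | cons j NS ih =>
    rw [List.map_cons]
    rw [show pvBump t (Int.ofNat j :: NS.map Int.ofNat) rem
        = if rem > 0 then pvBump (PySem.List.pySetD t (Int.ofNat j) (PySem.List.pyGetD t (Int.ofNat j) 0 + 1)) (NS.map Int.ofNat) (rem - 1) else (t, rem) from rfl]
    by_cases hr : rem > 0
    · rw [if_pos hr]
      have hj : j < t.length := hlt j (by simp)
      have hset : PySem.List.pySetD t (Int.ofNat j) (PySem.List.pyGetD t (Int.ofNat j) 0 + 1)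
          = t.set j (t[j] + 1) := by
        simp [PySem.List.pySetD_natCast, PySem.List.pyGetD_eq_getElem, hj]
      rw [hset]
      have hlen : (t.set j (t[j] + 1)).length = t.length := by simp
      rw [ih (t.set j (t[j] + 1)) (rem - 1) hnd.of_cons
        (fun x hx => by rw [hlen]; exact hlt x (by simp [hx])) (by rw [hlen]; exact hp)]
      have htake : (j :: NS).take rem.toNat = j :: NS.take (rem - 1).toNat := by
        have h1 : rem.toNat = (rem - 1).toNat + 1 := by omega
        rw [h1]; rfl
      rw [htake]
      by_cases hpj : p = j
      · subst hpj
        have hnm : p ∉ NS.take (rem - 1).toNat :=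
          fun h => (List.nodup_cons.mp hnd).1 (List.mem_of_mem_take h)
        simp
        rw [show rem.toNat - 1 = (rem - 1).toNat from by omega]
        exact hnm
      · simp [hpj, Ne.symm hpj]
    · rw [if_neg hr]
      have h0 : rem.toNat = 0 := by omega
      simp [h0, List.getElem?_eq_getElem hp]

-- A's enumerate-filter-map builds the filtered range (shifted by the start offset)
theorem pvEnumFilter (xs : List String) (s : Int) :
    ((PySem.List.enumerate xs s).filter (fun p => pvIsDinner p.2)).map (·.1)
      = ((List.range xs.length).filter (fun i => pvIsDinner (xs.getD i ""))).map (fun i : ℕ => s + Int.ofNat i) := by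
  induction xs generalizing s with
  | nil => simp [PySem.List.enumerate_nil]
  | cons x xs ih =>
    rw [PySem.List.enumerate_cons]
    rw [List.length_cons, List.range_succ_eq_map]
    rw [List.filter_cons, List.filter_cons]
    simp only [List.getD_cons_zero]
    have h2 : List.filter ((fun i => pvIsDinner ((x :: xs).getD i "")) ∘ Nat.succ) (List.range xs.length)
        = List.filter (fun i => pvIsDinner (xs.getD i "")) (List.range xs.length) := by
      apply List.filter_congr; intro i _; simp
    have h3 : List.map (fun i => s + 1 + Int.ofNat i)
          (List.filter (fun i => pvIsDinner (xs.getD i "")) (List.range xs.length))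
        = List.map ((fun i : ℕ => s + Int.ofNat i) ∘ Nat.succ)
          (List.filter (fun i => pvIsDinner (xs.getD i "")) (List.range xs.length)) := by
      apply List.map_congr_left
      intro i _
      simp [Function.comp]
      ring
    by_cases hx : pvIsDinner x
    · simp only [hx, if_pos]
      rw [List.map_cons, ih (s + 1), List.filter_map, h2, List.map_cons, List.map_map]
      congr 1
      simp
    · rw [if_neg (by simp [hx]), if_neg (by simp [hx])]
      rw [ih (s + 1), List.filter_map, h2, List.map_map]
      exact h3

-- membership in a take-prefix of a filtered range = "count of earlier hits is below the cut"
theorem pvFT (q : ℕ → Bool) (n m p : ℕ) :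
    (p ∈ ((List.range n).filter q).take m) ↔ (p < n ∧ q p ∧ ((List.range p).filter q).length < m) := by
  induction n with
  | zero => simp
  | succ n ih =>
    rw [List.range_succ, List.filter_append]
    rw [List.take_append]
    by_cases hpn : p < n
    · constructor
      · intro h
        rcases List.mem_append.mp h with h | h
        · exact ⟨by omega, (ih.mp h).2⟩
        · exfalso
          have := List.mem_of_mem_take h
          have : p ∈ List.filter q [n] := this
          simp at this
          omega
      · intro ⟨_, hq, hc⟩
        exact List.mem_append.mpr (.inl (ih.mpr ⟨hpn, hq, hc⟩))
    · by_cases hpe : p = n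
      · subst hpe
        constructor
        · intro h
          rcases List.mem_append.mp h with h | h
          · have := List.mem_of_mem_take h
            simp [List.mem_filter] at this
          · have hmem := List.mem_of_mem_take h
            simp [List.mem_filter] at hmem
            refine ⟨by omega, hmem, ?_⟩
            by_contra hge
            push Not at hge
            have : m - (List.filter q (List.range p)).length = 0 := by omega
            rw [this] at h
            simp at h
        · intro ⟨_, hq, hc⟩
          apply List.mem_append.mpr
          right
          have h1 : 0 < m - (List.filter q (List.range p)).length := by omega
          simp only [List.filter_cons, List.filter_nil, hq, if_pos]
          rw [List.take_of_length_le (by simp; omega)]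
          simp
      · constructor
        · intro h
          rcases List.mem_append.mp h with h | h
          · have := (ih.mp h).1; omega
          · have := List.mem_of_mem_take h
            simp [List.mem_filter] at this
            omega
        · intro ⟨h1, _, _⟩
          omega

-- counting hits among range p = countP over the take-p prefix of the flag list
theorem pvCNT (ds : List Bool) (pred : Bool → Bool) (p : ℕ) (hp : p ≤ ds.length) :
    ((List.range p).filter (fun i => pred (ds.getD i false))).length = (ds.take p).countP pred := by
  induction p with
  | zero => simp
  | succ p ih =>
    rw [List.range_succ, List.filter_append, List.length_append]
    rw [ih (by omega)]
    have hlt : p < ds.length := by omega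
    rw [List.take_add_one, List.countP_append]
    congr 1
    by_cases h : pred ds[p] <;>
      simp [List.getElem?_eq_getElem hlt, List.getD, h]

-- a hit at p means the prefix count is strictly below the total count
theorem pvLTtotal (ds : List Bool) (pred : Bool → Bool) (p : ℕ) (hp : p < ds.length)
    (hq : pred ds[p]) : (ds.take p).countP pred < ds.countP pred := by
  conv_rhs => rw [← List.take_append_drop p ds]
  rw [List.countP_append]
  have hdrop : ds.drop p = ds[p] :: ds.drop (p + 1) := List.drop_eq_getElem_cons hp
  rw [hdrop, List.countP_cons]
  simp [hq]

-- B's loop, characterised pointwise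
theorem pvBLoop_eq (ds : List Bool) (base lb db sl sd : Int) :
    pvBLoop ds base lb db sl sd
      = (List.range ds.length).map (fun p => base +
          if ds.getD p false then (if sd + ((ds.take p).countP (fun b => b) : Int) < db then 1 else 0)
          else (if sl + ((ds.take p).countP (fun b => !b) : Int) < lb then 1 else 0)) := by
  induction ds generalizing sl sd with
  | nil => simp [pvBLoop]
  | cons d ds ih =>
    rw [show pvBLoop (d :: ds) base lb db sl sd
        = if d then (base + if sd < db then 1 else 0) :: pvBLoop ds base lb db sl (sd + 1)
          else (base + if sl < lb then 1 else 0) :: pvBLoop ds base lb db (sl + 1) sd from rfl]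
    rw [List.length_cons, List.range_succ_eq_map, List.map_cons, List.map_map]
    by_cases hd : d
    · rw [if_pos hd]
      rw [ih sl (sd + 1)]
      subst hd
      congr 1
      · simp
      apply List.map_congr_left
      intro p _
      simp only [Function.comp, List.getD_cons_succ, List.take_succ_cons, List.countP_cons]
      rw [show sd + 1 + ((ds.take p).countP (fun b => b) : Int) = sd + (((ds.take p).countP (fun b => b) : Int) + 1)  from by ring]
      push_cast
      simp
    · rw [if_neg hd]
      rw [ih (sl + 1) sd]
      have hd' : d = false := by simpa using hd
      subst hd'
      congr 1
      · simp
      apply List.map_congr_left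
      intro p _
      simp only [Function.comp, List.getD_cons_succ, List.take_succ_cons, List.countP_cons]
      rw [show sl + 1 + ((ds.take p).countP (fun b => !b) : Int) = sl + (((ds.take p).countP (fun b => !b) : Int) + 1)  from by ring]
      push_cast
      simp

-- the main equivalence, on nonempty groups
theorem pvMain (n_people : Int) (groups : List String) (hne : groups ≠ []) :
    target_sizes n_people groups = target_sizes_alt n_people groups := by
  have hn : 0 < groups.length := List.length_pos_iff.mpr hne
  have hk : (0:Int) < (groups.length : Int) := by exact_mod_cast hn
  simp only [target_sizes, target_sizes_alt]
  set nL := groups.length with hnL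
  set base := PySem.Int.floordiv n_people (nL : Int) with hbase
  set rem := PySem.Int.mod n_people (nL : Int) with hrem
  have hrem0 : 0 ≤ rem := PySem.Int.mod_nonneg n_people hk
  set ds : List Bool := groups.map pvIsDinner with hds
  have hdsl : ds.length = nL := by rw [hds, List.length_map]
  set q : ℕ → Bool := fun i => ds.getD i false with hq
  set DN : List ℕ := (List.range nL).filter q with hDN
  set LN : List ℕ := (List.range nL).filter (fun i => !q i) with hLN
  -- the dinner-index list is the filtered range
  have hgetd : ∀ i, i < nL → pvIsDinner (groups.getD i "") = q i := by
    intro i hi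
    rw [hq, hds]
    simp [List.getD, List.getElem?_map, List.getElem?_eq_getElem hi]
  have hD : ((PySem.List.enumerate groups 0).filter (fun p => pvIsDinner p.2)).map (·.1)
      = DN.map Int.ofNat := by
    rw [pvEnumFilter, hDN]
    have hfil : (List.range nL).filter (fun i => pvIsDinner (groups.getD i ""))
        = (List.range nL).filter q := by
      apply List.filter_congr; intro i hi
      exact hgetd i (List.mem_range.mp hi)
    rw [hfil]
    apply List.map_congr_left
    intro i _
    simp
  rw [hD]
  -- the lunch-index list is the complementary filtered range
  have hL : (PySem.List.pyRange 0 (nL : Int) 1).filter (fun i => !((DN.map Int.ofNat).contains i))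
      = LN.map Int.ofNat := by
    rw [PySem.List.pyRange_zero_nat, hLN]
    have hcast : (List.range nL).map (fun k : ℕ => (k : Int)) = (List.range nL).map Int.ofNat := by
      simp [Int.ofNat_eq_natCast]
    rw [hcast, List.filter_map]
    congr 1
    apply List.filter_congr
    intro i hi
    have hilt : i < nL := List.mem_range.mp hi
    simp only [Function.comp]
    have hmem : ((DN.map Int.ofNat).contains (Int.ofNat i)) = decide (i ∈ DN) := by
      by_cases h : i ∈ DN <;> simp [h]
    rw [hmem]
    by_cases hqi : q i
    · simp [hDN, List.mem_filter, List.mem_range, hilt, hqi]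
    · simp [hDN, List.mem_filter, hqi]
  rw [hL]
  -- facts about the index lists
  have hndLN : LN.Nodup := List.Nodup.filter _ List.nodup_range
  have hndDN : DN.Nodup := List.Nodup.filter _ List.nodup_range
  have hltLN : ∀ j ∈ LN, j < nL := fun j hj => List.mem_range.mp (List.mem_of_mem_filter hj)
  have hltDN : ∀ j ∈ DN, j < nL := fun j hj => List.mem_range.mp (List.mem_of_mem_filter hj)
  -- total counts
  have htakeAll : ds.take nL = ds := by rw [← hdsl]; exact List.take_length
  have hcntF : LN.length = ds.countP (fun b => !b) := by
    rw [hLN]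
    have := pvCNT ds (fun b => !b) nL (by omega)
    rw [htakeAll] at this
    rw [← this]
  have hcntD : DN.length = ds.countP (fun b => b) := by
    rw [hDN]
    have := pvCNT ds (fun b => b) nL (by omega)
    rw [htakeAll] at this
    rw [← this]
  -- B's lunch bonus
  have hcount : ((PySem.List.count ds false : Nat) : Int) = (ds.countP (fun b => !b) : Int) := by
    rw [PySem.List.count_eq]
    congr 1
    rw [List.count_eq_countP]
    apply List.countP_congr
    intro b _
    cases b <;> simp
  rw [hcount, pvBLoop_eq]
  -- first bump
  set t0 : List Int := List.replicate nL base with ht0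
  have ht0l : t0.length = nL := by simp [ht0]
  have hg1 : ∀ p, (hp : p < nL) → (pvBump t0 (LN.map Int.ofNat) rem).1[p]?
      = some (base + (if p ∈ LN.take rem.toNat then 1 else 0)) := by
    intro p hp
    rw [pvBump_get? LN t0 rem hndLN (fun j hj => ht0l ▸ hltLN j hj) p (ht0l ▸ hp)]
    congr 2
    simp [ht0]
  have hlen1 : (pvBump t0 (LN.map Int.ofNat) rem).1.length = nL := by rw [pvBump_len, ht0l]
  have hsnd1 : (pvBump t0 (LN.map Int.ofNat) rem).2
      = rem - min rem (ds.countP (fun b => !b) : Int) := by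
    rw [pvBump_snd _ _ _ hrem0]
    rw [List.length_map, hcntF]
  set t1 := (pvBump t0 (LN.map Int.ofNat) rem).1 with ht1
  set rem2 := (pvBump t0 (LN.map Int.ofNat) rem).2 with hrem2
  have hrem2_0 : 0 ≤ rem2 := by
    rw [hsnd1]
    have h := min_le_left rem ((ds.countP (fun b => !b) : Int))
    linarith
  -- final pointwise comparison
  apply List.ext_getElem?
  intro p
  by_cases hp : p < nL
  · rw [pvBump_get? DN t1 rem2 hndDN (fun j hj => (ht1 ▸ hlen1) ▸ hltDN j hj) p ((ht1 ▸ hlen1) ▸ hp)]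
    have ht1p : t1[p]'((ht1 ▸ hlen1) ▸ hp) = base + (if p ∈ LN.take rem.toNat then 1 else 0) := by
      have h1 := hg1 p hp
      rw [ht1] at *
      rw [List.getElem?_eq_getElem (hlen1 ▸ hp)] at h1
      exact Option.some.inj h1
    rw [ht1p]
    -- B side getElem?
    rw [List.getElem?_map, List.getElem?_range (hdsl ▸ hp)]
    simp only [Option.map_some]
    congr 1
    have hpds : p < ds.length := by omega
    have hdsp : ds.getD p false = ds[p] := by
      rw [List.getD, List.getElem?_eq_getElem hpds]; rfl
    by_cases hb : ds.getD p false
    · -- dinner group at p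
      have hqp : q p = true := by simp only [hq]; exact hb
      have hnotL : p ∉ List.take rem.toNat LN := by
        intro hmem
        have hmem' := List.mem_of_mem_take hmem
        rw [hLN, List.mem_filter] at hmem'
        rw [hqp] at hmem'
        simpa using hmem'.2
      rw [if_neg hnotL, if_pos hb]
      have hmemiff : (p ∈ List.take rem2.toNat DN) ↔ ((ds.take p).countP (fun b => b)) < rem2.toNat := by
        have h := pvFT q nL rem2.toNat p
        rw [← hDN] at h
        have hc' : ((List.range p).filter q).length = (ds.take p).countP (fun b => b) := by
          have h2 := pvCNT ds (fun b => b) p (by omega)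
          rw [← h2]
        rw [hc'] at h
        constructor
        · intro hm; exact (h.mp hm).2.2
        · intro hcnt; exact h.mpr ⟨hp, hqp, hcnt⟩
      rw [← hsnd1]
      by_cases hcT : (ds.take p).countP (fun b => b) < rem2.toNat
      · rw [if_pos (hmemiff.mpr hcT), if_pos (by omega)]
        ring
      · rw [if_neg (fun hm => hcT (hmemiff.mp hm)), if_neg (by omega)]
        ring
    · -- lunch group at p
      have hbf : ds.getD p false = false := by simpa using hb
      have hqp : q p = false := by simp only [hq]; exact hbf
      have hnotD : p ∉ List.take rem2.toNat DN := by
        intro hmem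
        have hmem' := List.mem_of_mem_take hmem
        rw [hDN, List.mem_filter] at hmem'
        rw [hqp] at hmem'
        simpa using hmem'.2
      rw [if_neg hnotD]
      conv_rhs => rw [if_neg (show ¬(ds.getD p false = true) from by rw [hbf]; simp)]
      have hmemiff : (p ∈ List.take rem.toNat LN) ↔ ((ds.take p).countP (fun b => !b)) < rem.toNat := by
        have h := pvFT (fun i => !q i) nL rem.toNat p
        rw [← hLN] at h
        have hc : ((List.range p).filter (fun i => !q i)).length = (ds.take p).countP (fun b => !b) := by
          have h2 := pvCNT ds (fun b => !b) p (by omega)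
          rw [← h2]
        rw [hc] at h
        constructor
        · intro hm; exact (h.mp hm).2.2
        · intro hcnt; exact h.mpr ⟨hp, by rw [hqp]; rfl, hcnt⟩
      have hdspf : ds[p] = false := by rw [← hdsp]; exact hbf
      have hptotal : (ds.take p).countP (fun b => !b) < ds.countP (fun b => !b) :=
        pvLTtotal ds (fun b => !b) p hpds (by rw [hdspf]; rfl)
      by_cases hcF : (ds.take p).countP (fun b => !b) < rem.toNat
      · rw [if_pos (hmemiff.mpr hcF), if_pos (by
          rw [zero_add, lt_min_iff]
          constructor
          · omega
          · exact_mod_cast hptotal)]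
        ring
      · rw [if_neg (fun hm => hcF (hmemiff.mp hm)), if_neg (by
          rw [zero_add, lt_min_iff]
          rintro ⟨h1, -⟩
          omega)]
        ring
  · -- both sides none
    rw [List.getElem?_eq_none, List.getElem?_eq_none]
    · rw [List.length_map, List.length_range, hdsl]; omega
    · rw [pvBump_len]; rw [ht1, hlen1]; omega

-- ===== VERDICT (by name: the statement is the Claim_ definition above) =====
theorem target_sizes_spec : Claim_equal_target_sizes := by
  intro n_people groups _ hpre
  unfold Spec_target_sizes
  exact pvMain n_people groups hpre
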